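-- pv_equiv track=rewrite | github.com/Waspasik/Python | Repetition is the Mother of Learning Part 1.2.py | choose_plural
-- ===== SOURCE A (Python) =====
-- def choose_plural(amount, declensions):
--     suffixes = {
--         1: 0, 2: 1, 3: 1, 4: 1, 5: 2, 6: 2, 7: 2, 8: 2, 9: 2, 10: 2,
--         11: 2, 12: 2, 13: 2, 14: 2, 15: 2, 16: 2, 17: 2, 18: 2, 19: 2, 20: 2, 0: 2,
--     }
--
--     for key, value in suffixes.items():
--         if len(str(amount)) >= 2 and str(amount)[-2:] in ['11', '12', '13', '14']:
--             return f'{amount} {declensions[suffixes[11]]}'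
--         elif len(str(amount)) >= 2 and str(amount)[-2:] == str(key):
--             return f'{amount} {declensions[value]}'
--         elif len(str(amount)) >= 2 and str(amount)[-1] == str(key):
--             return f'{amount} {declensions[value]}'
--         elif len(str(amount)) == 1 and str(amount)[-1] == str(key):
--             return f'{amount} {declensions[value]}'
-- ===== SOURCE B (Python) =====
-- def choose_plural(amount, declensions):
--     s = str(amount)
--     if s[-2:] in ('11', '12', '13', '14'):
--         i = 2
--     elif s[-1] == '1':
--         i = 0
--     elif s[-1] in ('2', '3', '4'):
--         i = 1
--     else:
--         i = 2
--     return f'{amount} {declensions[i]}'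
-- ===== Notes on version B (the rewrite author's own statement) =====
-- stated objective: simpler
-- what changed: Replaces the 21-iteration scan over a hard-coded suffix dict (re-stringifying amount and re-checking four conditions per key) with a single four-way branch on the last one/two characters of str(amount).
import Mathlib
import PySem

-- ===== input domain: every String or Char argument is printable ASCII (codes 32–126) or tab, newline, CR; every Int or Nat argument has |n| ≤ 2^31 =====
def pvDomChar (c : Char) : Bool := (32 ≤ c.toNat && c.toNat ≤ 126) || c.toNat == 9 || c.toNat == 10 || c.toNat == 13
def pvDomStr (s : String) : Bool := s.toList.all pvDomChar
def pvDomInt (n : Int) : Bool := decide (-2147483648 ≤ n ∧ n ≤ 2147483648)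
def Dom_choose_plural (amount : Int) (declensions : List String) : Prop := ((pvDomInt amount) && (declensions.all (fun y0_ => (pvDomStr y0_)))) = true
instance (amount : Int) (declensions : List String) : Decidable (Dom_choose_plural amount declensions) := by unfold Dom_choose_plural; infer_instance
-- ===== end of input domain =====

-- B replaces A's 21-iteration dict scan by a direct four-way branch on the last one/two characters of str(amount); objective: simpler.


-- ===== PORT A =====
-- f'{amount} {d}' = str(amount) + ' ' + d
def pvFmt (amount : Int) (d : String) : String :=
  String.ofList (PySem.Int.toChars amount ++ ' ' :: d.toList)

-- the dict literal `suffixes` (distinct keys, insertion order)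
def pvSuffixes : PySem.Dict Int Int :=
  PySem.Dict.ofList [(1,0),(2,1),(3,1),(4,1),(5,2),(6,2),(7,2),(8,2),(9,2),(10,2),
                     (11,2),(12,2),(13,2),(14,2),(15,2),(16,2),(17,2),(18,2),(19,2),(20,2),(0,2)]

-- ['11', '12', '13', '14'] as char lists (str comparison is on code points)
def pvL14 : List (List Char) := [['1','1'],['1','2'],['1','3'],['1','4']]

-- the `for key, value in suffixes.items()` loop with its early returns;
-- `none` = the loop raised IndexError (excluded by Pre_) or fell through returning Python's None
-- (the fall-through is unreachable for int amounts, see the proofs below)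
def pvLoopA (amount : Int) (declensions : List String) : List (Int × Int) → Option String
  | [] => none
  | (key, value) :: rest =>
    let s := PySem.Int.toChars amount
    if 2 ≤ s.length ∧ PySem.List.slice s (some (-2)) none ∈ pvL14 then
      (PySem.List.pyGet? declensions (pvSuffixes.getD 11 0)).map (pvFmt amount)
    else if 2 ≤ s.length ∧ PySem.List.slice s (some (-2)) none = PySem.Int.toChars key then
      (PySem.List.pyGet? declensions value).map (pvFmt amount)
    else if 2 ≤ s.length ∧ (PySem.List.pyGet? s (-1)).map (fun c => [c]) = some (PySem.Int.toChars key) then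
      (PySem.List.pyGet? declensions value).map (pvFmt amount)
    else if s.length = 1 ∧ (PySem.List.pyGet? s (-1)).map (fun c => [c]) = some (PySem.Int.toChars key) then
      (PySem.List.pyGet? declensions value).map (pvFmt amount)
    else pvLoopA amount declensions rest

def choose_plural (amount : Int) (declensions : List String) : String :=
  (pvLoopA amount declensions pvSuffixes.items).getD ""

-- ===== PORT B =====
def choose_plural_alt (amount : Int) (declensions : List String) : String :=
  let s := PySem.Int.toChars amount
  let i : Int :=
    if PySem.List.slice s (some (-2)) none ∈ [['1','1'],['1','2'],['1','3'],['1','4']] then 2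
    else if PySem.List.pyGet? s (-1) = some '1' then 0
    else if PySem.List.pyGet? s (-1) ∈ [some '2', some '3', some '4'] then 1
    else 2
  pvFmt amount (PySem.List.pyGetD declensions i "")

-- ===== PRECONDITION & SPEC =====
-- the suffix index both programs select, as a closed arithmetic form on the digits of |amount|
def pvIdx (amount : Int) : Int :=
  if 11 ≤ amount.natAbs % 100 ∧ amount.natAbs % 100 ≤ 14 then 2
  else if amount.natAbs % 10 = 1 then 0
  else if 2 ≤ amount.natAbs % 10 ∧ amount.natAbs % 10 ≤ 4 then 1
  else 2

-- excludes exactly the inputs where A raises IndexError: declensions shorter than the selected index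
def Pre_choose_plural (amount : Int) (declensions : List String) : Prop :=
  pvIdx amount < (declensions.length : Int)
instance (amount : Int) (declensions : List String) : Decidable (Pre_choose_plural amount declensions) := by unfold Pre_choose_plural; infer_instance

def pvWitness_choose_plural : Int × List String := (5, ["item", "items", "items!"])

def Spec_choose_plural (amount : Int) (declensions : List String) (out : String) : Prop := out = choose_plural_alt amount declensions
instance (amount : Int) (declensions : List String) (out : String) : Decidable (Spec_choose_plural amount declensions out) := by unfold Spec_choose_plural; infer_instance

-- ===== CLAIM (what is proved, stated in full; the proofs are below) =====
def Claim_equal_choose_plural : Prop := ∀ (amount : Int) (declensions : List String), Dom_choose_plural amount declensions → Pre_choose_plural amount declensions → Spec_choose_plural amount declensions (choose_plural amount declensions)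

-- ===== LEMMAS AND PROOFS =====

lemma pv_toDigits_last (m : Nat) : ∃ t, Nat.toDigits 10 m = t ++ [Nat.digitChar (m % 10)] := by
  by_cases h : m < 10
  · exact ⟨[], by rw [Nat.toDigits_of_lt_base h, Nat.mod_eq_of_lt h]; rfl⟩
  · exact ⟨_, Nat.toDigits_of_base_le (by norm_num) (le_of_not_gt h)⟩

-- the shape of str(amount) for an int: one digit, or anything followed by ('-' or a digit) and a digit
lemma pv_shape (amount : Int) :
    (amount.natAbs < 10 ∧ 0 ≤ amount ∧ PySem.Int.toChars amount = [Nat.digitChar (amount.natAbs % 10)]) ∨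
    (∃ t b, PySem.Int.toChars amount = t ++ [b, Nat.digitChar (amount.natAbs % 10)] ∧
      ((amount.natAbs < 10 ∧ b = '-') ∨ (10 ≤ amount.natAbs ∧ b = Nat.digitChar (amount.natAbs / 10 % 10)))) := by
  by_cases h10 : amount.natAbs < 10
  · by_cases hneg : amount < 0
    · right
      refine ⟨[], '-', ?_, Or.inl ⟨h10, rfl⟩⟩
      rw [PySem.Int.toChars, if_pos hneg, Nat.toDigits_of_lt_base h10, Nat.mod_eq_of_lt h10]
      rfl
    · left
      refine ⟨h10, le_of_not_gt hneg, ?_⟩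
      rw [PySem.Int.toChars, if_neg hneg, (by omega : amount.toNat = amount.natAbs)]
      rw [Nat.toDigits_of_lt_base h10, Nat.mod_eq_of_lt h10]
  · right
    have h10' : 10 ≤ amount.natAbs := le_of_not_gt h10
    have hsplit : Nat.toDigits 10 amount.natAbs =
        Nat.toDigits 10 (amount.natAbs / 10) ++ [Nat.digitChar (amount.natAbs % 10)] :=
      Nat.toDigits_of_base_le (by norm_num) h10'
    obtain ⟨t, ht⟩ := pv_toDigits_last (amount.natAbs / 10)
    by_cases hneg : amount < 0
    · refine ⟨'-' :: t, Nat.digitChar (amount.natAbs / 10 % 10), ?_, Or.inr ⟨h10', rfl⟩⟩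
      rw [PySem.Int.toChars, if_pos hneg, hsplit, ht]
      simp
    · refine ⟨t, Nat.digitChar (amount.natAbs / 10 % 10), ?_, Or.inr ⟨h10', rfl⟩⟩
      rw [PySem.Int.toChars, if_neg hneg, (by omega : amount.toNat = amount.natAbs), hsplit, ht]
      simp

lemma pv_slice2 (t : List Char) (b c : Char) :
    PySem.List.slice (t ++ [b, c]) (some (-2)) none = [b, c] := by
  rw [PySem.List.slice_from_neg_ofNat _ 2 (by norm_num)]
  have : (t ++ [b, c]).length - 2 = t.length := by simp
  rw [this]
  exact List.drop_left

lemma pv_slice1 (a : Char) : PySem.List.slice [a] (some (-2)) none = [a] := by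
  rw [PySem.List.slice_from_neg_ofNat _ 2 (by norm_num)]; rfl

lemma pv_last2 (t : List Char) (b c : Char) :
    PySem.List.pyGet? (t ++ [b, c]) (-1) = some c := by
  have h : t ++ [b, c] = (t ++ [b]) ++ [c] := by simp
  rw [h, PySem.List.pyGet?_neg_one_append_singleton]

lemma pv_last1 (a : Char) : PySem.List.pyGet? [a] (-1) = some a := by
  simpa using PySem.List.pyGet?_neg_one_append_singleton [] a

lemma pv_keys :
    pvSuffixes.items = [((1:Int),(0:Int)),(2,1),(3,1),(4,1),(5,2),(6,2),(7,2),(8,2),(9,2),(10,2),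
      (11,2),(12,2),(13,2),(14,2),(15,2),(16,2),(17,2),(18,2),(19,2),(20,2),(0,2)] ∧
    pvSuffixes.getD 11 0 = 2 ∧
    PySem.Int.toChars 1 = ['1'] ∧ PySem.Int.toChars 2 = ['2'] ∧ PySem.Int.toChars 3 = ['3'] ∧
    PySem.Int.toChars 4 = ['4'] ∧ PySem.Int.toChars 5 = ['5'] ∧ PySem.Int.toChars 6 = ['6'] ∧
    PySem.Int.toChars 7 = ['7'] ∧ PySem.Int.toChars 8 = ['8'] ∧ PySem.Int.toChars 9 = ['9'] ∧
    PySem.Int.toChars 10 = ['1','0'] ∧ PySem.Int.toChars 11 = ['1','1'] ∧ PySem.Int.toChars 12 = ['1','2'] ∧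
    PySem.Int.toChars 13 = ['1','3'] ∧ PySem.Int.toChars 14 = ['1','4'] ∧ PySem.Int.toChars 15 = ['1','5'] ∧
    PySem.Int.toChars 16 = ['1','6'] ∧ PySem.Int.toChars 17 = ['1','7'] ∧ PySem.Int.toChars 18 = ['1','8'] ∧
    PySem.Int.toChars 19 = ['1','9'] ∧ PySem.Int.toChars 20 = ['2','0'] ∧ PySem.Int.toChars 0 = ['0'] ∧
    Nat.digitChar 0 = '0' ∧ Nat.digitChar 1 = '1' ∧ Nat.digitChar 2 = '2' ∧ Nat.digitChar 3 = '3' ∧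
    Nat.digitChar 4 = '4' ∧ Nat.digitChar 5 = '5' ∧ Nat.digitChar 6 = '6' ∧ Nat.digitChar 7 = '7' ∧
    Nat.digitChar 8 = '8' ∧ Nat.digitChar 9 = '9' := by
  decide

set_option maxHeartbeats 3200000 in
lemma pv_loopA_eval (amount : Int) (declensions : List String) :
    pvLoopA amount declensions pvSuffixes.items =
      (PySem.List.pyGet? declensions (pvIdx amount)).map (pvFmt amount) := by
  obtain ⟨d, hd⟩ : ∃ d, amount.natAbs % 10 = d := ⟨_, rfl⟩
  have hdlt : d < 10 := by omega
  rcases pv_shape amount with ⟨h10, hpos, hs⟩ | ⟨t, b, hs, hb⟩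
  · have h100 : amount.natAbs % 100 = d := by omega
    rw [hd] at hs
    unfold pvIdx
    interval_cases d <;> simp [pv_keys.1, pvLoopA, pvL14, hs, h100, hd, pv_slice1, pv_last1, pv_keys]
  · rw [hd] at hs
    rcases hb with ⟨h10, hb⟩ | ⟨h10, he'⟩
    · subst hb
      have h100 : amount.natAbs % 100 = d := by omega
      unfold pvIdx
      interval_cases d <;> simp [pv_keys.1, pvLoopA, pvL14, hs, h100, hd, pv_slice2, pv_last2, pv_keys]
    · obtain ⟨e, he⟩ : ∃ e, amount.natAbs / 10 % 10 = e := ⟨_, rfl⟩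
      have helt : e < 10 := by omega
      rw [he] at he'
      subst he'
      have h100 : amount.natAbs % 100 = 10 * e + d := by omega
      unfold pvIdx
      interval_cases e <;> interval_cases d <;>
        simp [pv_keys.1, pvLoopA, pvL14, hs, h100, hd, pv_slice2, pv_last2, pv_keys]

lemma pv_altB_eval (amount : Int) (declensions : List String) :
    choose_plural_alt amount declensions =
      pvFmt amount (PySem.List.pyGetD declensions (pvIdx amount) "") := by
  obtain ⟨d, hd⟩ : ∃ d, amount.natAbs % 10 = d := ⟨_, rfl⟩
  have hdlt : d < 10 := by omega
  rcases pv_shape amount with ⟨h10, hpos, hs⟩ | ⟨t, b, hs, hb⟩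
  · have h100 : amount.natAbs % 100 = d := by omega
    rw [hd] at hs
    unfold choose_plural_alt pvIdx
    interval_cases d <;> simp [hs, h100, hd, pv_slice1, pv_last1, pv_keys]
  · rw [hd] at hs
    rcases hb with ⟨h10, hb⟩ | ⟨h10, he'⟩
    · subst hb
      have h100 : amount.natAbs % 100 = d := by omega
      unfold choose_plural_alt pvIdx
      interval_cases d <;> simp [hs, h100, hd, pv_slice2, pv_last2, pv_keys]
    · obtain ⟨e, he⟩ : ∃ e, amount.natAbs / 10 % 10 = e := ⟨_, rfl⟩
      have helt : e < 10 := by omega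
      rw [he] at he'
      subst he'
      have h100 : amount.natAbs % 100 = 10 * e + d := by omega
      unfold choose_plural_alt pvIdx
      interval_cases e <;> interval_cases d <;>
        simp [hs, h100, hd, pv_slice2, pv_last2, pv_keys]

lemma pv_idx_nonneg (amount : Int) : 0 ≤ pvIdx amount := by
  unfold pvIdx; split_ifs <;> norm_num

-- ===== VERDICT (by name: the statement is the Claim_ definition above) =====
theorem choose_plural_spec : Claim_equal_choose_plural := by
  intro amount declensions _ hPre
  unfold Spec_choose_plural
  have h0 := pv_idx_nonneg amount
  have hlt : pvIdx amount < (declensions.length : Int) := hPre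
  rw [choose_plural, pv_loopA_eval, pv_altB_eval,
      PySem.List.pyGet?_eq_some_getElem declensions h0 hlt,
      PySem.List.pyGetD_eq_getElem declensions "" h0 hlt]
  rfl
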